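-- pv_equiv track=rewrite | github.com/AgatheG/advent-of-code-2020 | day-23/code.py | pick_up_cups
-- ===== SOURCE A (Python) =====
-- N = 9
--
-- def pick_up_cups(current_idx, input_data):
--     s = ""
--     new_data = input_data
--     for i in range(1,4):
--         char = input_data[(current_idx+i)%N]
--         s += char
--         new_data = new_data.replace(char, "")
--     return s, new_data
-- ===== SOURCE B (Python) =====
-- N = 9
--
-- def pick_up_cups(current_idx, input_data):
--     s = _picked(current_idx, input_data, 3)
--     new_data = _remove(input_data, len(input_data) - 1, s)
--     return s, new_data
--
-- def _picked(idx, data, k):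
--     # recursively collect the cups at (idx+1)%N .. (idx+k)%N, in pick order
--     if k == 0:
--         return ""
--     return _picked(idx, data, k - 1) + data[(idx + k) % N]
--
-- def _remove(data, i, s):
--     # rebuild data minus every occurrence of a char of s, walking the string
--     # from the right end (index i down to 0) and prepending kept characters
--     out = ""
--     while i >= 0:
--         ch = data[i]
--         if ch not in s:
--             out = ch + out
--         i -= 1
--     return out
-- ===== Notes on version B (the rewrite author's own statement) =====
-- stated objective: alternative
-- what changed: B replaces A's loop of three str.replace mutations by a recursive helper that builds the picked triple by recursion on the pick count, plus a back-to-front reconstruction of the remaining string: a while loop walking the string from its last index down to 0, prepending each character whose membership test against the picked triple fails, instead of any replace/filter-forward pass.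
import Mathlib
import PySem

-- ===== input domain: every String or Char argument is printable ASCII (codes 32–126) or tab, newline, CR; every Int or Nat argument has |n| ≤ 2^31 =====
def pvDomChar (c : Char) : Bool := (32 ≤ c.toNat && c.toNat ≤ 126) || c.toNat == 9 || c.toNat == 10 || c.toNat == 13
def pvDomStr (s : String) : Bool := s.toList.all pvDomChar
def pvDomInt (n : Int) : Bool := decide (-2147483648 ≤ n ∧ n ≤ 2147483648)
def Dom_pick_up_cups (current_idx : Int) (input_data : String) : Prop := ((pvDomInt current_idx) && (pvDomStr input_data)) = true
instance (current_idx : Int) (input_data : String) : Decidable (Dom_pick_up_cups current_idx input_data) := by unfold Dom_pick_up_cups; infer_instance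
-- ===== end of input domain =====

-- B replaces A's loop of three str.replace mutations by two recursive helpers: one builds the
-- picked triple by recursion on the pick count, the other rebuilds the remaining string by
-- structural recursion from the right end (objective: alternative decomposition, same cost).

-- ===== PORT A =====
-- A's for-loop over range(1,4): state (s, new_data); pyGet? none = IndexError (outside Pre_).
def pick_up_cups (current_idx : Int) (input_data : String) : String × String :=
  let step : Option (List Char × List Char) → Int → Option (List Char × List Char) :=
    fun st i =>
      match st with
      | none => none
      | some (s, nd) =>
        match PySem.List.pyGet? input_data.toList (PySem.Int.mod (current_idx + i) 9) with
        | none => none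
        | some ch => some (s ++ [ch], PySem.Chars.replace nd [ch] [])
  match (PySem.List.pyRange 1 4 1).foldl step (some ([], input_data.toList)) with
  | some (s, nd) => (String.mk s, String.mk nd)
  | none => ("", "")

-- ===== PORT B =====
-- Source B's _picked: recursion on k; pyGet? none = IndexError (outside Pre_).
def pickedOpt (idx : Int) (l : List Char) : Nat → Option (List Char)
  | 0 => some []
  | Nat.succ k =>
    match pickedOpt idx l k, PySem.List.pyGet? l (PySem.Int.mod (idx + ((k : Int) + 1)) 9) with
    | some p, some c => some (p ++ [c])
    | _, _ => none

-- Source B's _remove: while loop from the right end with accumulator out; loop counter n = i+1,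
-- so data[i] = l.getD n ' ' is always in range when called with n = l.length (0 ≤ i < len: exact).
def removeFrom (l : List Char) (s : List Char) : Nat → List Char → List Char
  | 0, out => out
  | Nat.succ n, out =>
    let ch := l.getD n ' '
    removeFrom l s n (if s.contains ch then out else ch :: out)

def pick_up_cups_alt (current_idx : Int) (input_data : String) : String × String :=
  let l := input_data.toList
  match pickedOpt current_idx l 3 with
  | some p => (String.mk p, String.mk (removeFrom l p l.length []))
  | none => ("", "")

-- ===== PRECONDITION & SPEC =====
-- Exactly the inputs on which Python A returns: all three picked indices (always ≥ 0 after % 9) are in range.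
def Pre_pick_up_cups (current_idx : Int) (input_data : String) : Prop :=
  PySem.Raise.InRange input_data.toList.length (PySem.Int.mod (current_idx + 1) 9) ∧
  PySem.Raise.InRange input_data.toList.length (PySem.Int.mod (current_idx + 2) 9) ∧
  PySem.Raise.InRange input_data.toList.length (PySem.Int.mod (current_idx + 3) 9)
instance (current_idx : Int) (input_data : String) : Decidable (Pre_pick_up_cups current_idx input_data) := by unfold Pre_pick_up_cups; infer_instance
def pvWitness_pick_up_cups : Int × String := (0, "123456789")

def Spec_pick_up_cups (current_idx : Int) (input_data : String) (out : String × String) : Prop := out = pick_up_cups_alt current_idx input_data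
instance (current_idx : Int) (input_data : String) (out : String × String) : Decidable (Spec_pick_up_cups current_idx input_data out) := by unfold Spec_pick_up_cups; infer_instance

-- ===== CLAIM (what is proved, stated in full; the proofs are below) =====
def Claim_equal_pick_up_cups : Prop := ∀ (current_idx : Int) (input_data : String), Dom_pick_up_cups current_idx input_data → Pre_pick_up_cups current_idx input_data → Spec_pick_up_cups current_idx input_data (pick_up_cups current_idx input_data)

-- ===== LEMMAS AND PROOFS =====

-- str.replace(char, "") removes exactly the occurrences of that character: it is a filter.
theorem replace_go_single (c : Char) :
    ∀ (fuel : Nat) (l acc : List Char), l.length ≤ fuel →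
      PySem.Chars.replace.go [c] [] fuel l acc = acc.reverse ++ l.filter (fun x => !(x == c)) := by
  intro fuel
  induction fuel with
  | zero =>
    intro l acc h
    have : l = [] := List.length_eq_zero_iff.mp (Nat.le_zero.mp h)
    subst this
    simp [PySem.Chars.replace.go]
  | succ n ih =>
    intro l acc h
    cases l with
    | nil => simp [PySem.Chars.replace.go]
    | cons c0 t =>
      by_cases hc : c = c0
      · subst hc
        have : PySem.Chars.replace.go [c] [] (n+1) (c :: t) acc
            = PySem.Chars.replace.go [c] [] n t acc := by
          simp [PySem.Chars.replace.go, List.isPrefixOf]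
        rw [this, ih t acc (by simpa using h)]
        simp
      · have : PySem.Chars.replace.go [c] [] (n+1) (c0 :: t) acc
            = PySem.Chars.replace.go [c] [] n t (c0 :: acc) := by
          simp [PySem.Chars.replace.go, List.isPrefixOf, beq_iff_eq, hc]
        rw [this, ih t (c0 :: acc) (by simpa using h)]
        have hc' : (c0 == c) = false := by simp [Ne.symm hc]
        simp [hc']

theorem replace_single (c : Char) (l : List Char) :
    PySem.Chars.replace l [c] [] = l.filter (fun x => !(x == c)) := by
  have := replace_go_single c l.length l [] (le_refl _)
  simpa [PySem.Chars.replace] using this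

-- B's right-end recursion builds exactly the filtered prefix.
theorem removeFrom_eq_filter (l s : List Char) :
    ∀ (n : Nat) (out : List Char), n ≤ l.length →
      removeFrom l s n out = (l.take n).filter (fun x => !(s.contains x)) ++ out := by
  intro n
  induction n with
  | zero => intro out _; simp [removeFrom]
  | succ n ih =>
    intro out h
    have hn : n < l.length := Nat.lt_of_succ_le h
    have hget : l.getD n ' ' = l[n] := by
      simp [List.getD_eq_getElem?_getD, List.getElem?_eq_getElem hn]
    have htake : l.take (n+1) = l.take n ++ [l[n]] := by
      rw [List.take_add_one, List.getElem?_eq_getElem hn]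
      rfl
    rw [removeFrom]
    simp only [hget, htake, List.filter_append]
    by_cases hc : l[n] ∈ s
    · rw [ih _ (Nat.le_of_lt hn)]
      simp [hc]
    · rw [ih _ (Nat.le_of_lt hn)]
      simp [hc]

-- ===== VERDICT (by name: the statement is the Claim_ definition above) =====
set_option maxHeartbeats 1000000 in
theorem pick_up_cups_spec : Claim_equal_pick_up_cups := by
  unfold Claim_equal_pick_up_cups
  intro ci s _ hpre
  obtain ⟨h1, h2, h3⟩ := hpre
  obtain ⟨c1, hc1⟩ : ∃ c, PySem.List.pyGet? s.toList (PySem.Int.mod (ci + 1) 9) = some c := by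
    cases hg : PySem.List.pyGet? s.toList (PySem.Int.mod (ci + 1) 9) with
    | none => exact absurd h1 ((PySem.List.pyGet?_eq_none_iff _ _).mp hg)
    | some c => exact ⟨c, rfl⟩
  obtain ⟨c2, hc2⟩ : ∃ c, PySem.List.pyGet? s.toList (PySem.Int.mod (ci + 2) 9) = some c := by
    cases hg : PySem.List.pyGet? s.toList (PySem.Int.mod (ci + 2) 9) with
    | none => exact absurd h2 ((PySem.List.pyGet?_eq_none_iff _ _).mp hg)
    | some c => exact ⟨c, rfl⟩
  obtain ⟨c3, hc3⟩ : ∃ c, PySem.List.pyGet? s.toList (PySem.Int.mod (ci + 3) 9) = some c := by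
    cases hg : PySem.List.pyGet? s.toList (PySem.Int.mod (ci + 3) 9) with
    | none => exact absurd h3 ((PySem.List.pyGet?_eq_none_iff _ _).mp hg)
    | some c => exact ⟨c, rfl⟩
  unfold Spec_pick_up_cups pick_up_cups pick_up_cups_alt
  have hr : PySem.List.pyRange 1 4 1 = [1, 2, 3] := by decide
  have hp : pickedOpt ci s.toList 3 = some [c1, c2, c3] := by
    have e1 : ((0 : Nat) : Int) + 1 = 1 := by norm_num
    have e2 : ((1 : Nat) : Int) + 1 = 2 := by norm_num
    have e3 : ((2 : Nat) : Int) + 1 = 3 := by norm_num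
    simp only [pickedOpt, e1, e2, e3, hc1, hc2, hc3]
    rfl
  rw [hr]
  simp only [List.foldl_cons, List.foldl_nil, hc1, hc2, hc3, hp]
  simp only [replace_single, removeFrom_eq_filter s.toList [c1, c2, c3] s.toList.length [] (le_refl _),
    List.take_length]
  congr 1
  refine congrArg String.mk ?_
  rw [List.filter_filter, List.filter_filter, List.append_nil]
  apply List.filter_congr
  intro x _
  by_cases hx1 : x = c1 <;> by_cases hx2 : x = c2 <;> by_cases hx3 : x = c3 <;>
    simp [hx1, hx2, hx3]
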